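-- pv_equiv track=rewrite | github.com/nguyentatloc21-web/IELTS-Speaking-AI | app.py | create_default_menu
-- ===== SOURCE A (Python) =====
-- def create_default_menu(content_dict, total_lessons=10):
--     menu = []
--     for i in range(1, total_lessons + 1):
--         # Tìm bài học tương ứng trong dict (Lesson X: ...)
--         lesson_key = next((k for k in content_dict.keys() if k.startswith(f"Lesson {i}:")), None)
--         if lesson_key:
--             menu.append(lesson_key)
--         else:
--             menu.append(f"Lesson {i}: (Sắp ra mắt)")
--     return menu
-- ===== SOURCE B (Python) =====
-- def create_default_menu(content_dict, total_lessons=10):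
--     # One pass over the keys: extract each key's "Lesson <n>:" prefix (up to its
--     # first colon), place it in its slot via a precomputed prefix->number dict
--     # (first match wins), then fill the remaining slots with the default label.
--     slots = {}
--     for i in range(1, total_lessons + 1):
--         slots[f"Lesson {i}:"] = i
--     menu = [None] * max(total_lessons, 0)
--     for k in content_dict:
--         pos = k.find(":")
--         if pos != -1:
--             i = slots.get(k[:pos + 1])
--             if i is not None and menu[i - 1] is None:
--                 menu[i - 1] = k
--     return [m if m is not None else f"Lesson {j}: (Sắp ra mắt)"
--             for j, m in enumerate(menu, 1)]
-- ===== Notes on version B (the rewrite author's own statement) =====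
-- stated objective: faster
-- what changed: A scans every dict key once per lesson (next(...) per i); B makes a single pass over the keys, slotting each key into menu[i-1] via a precomputed 'Lesson i:'-prefix dictionary (first match wins), then fills the empty slots with the default label.
import Mathlib
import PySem

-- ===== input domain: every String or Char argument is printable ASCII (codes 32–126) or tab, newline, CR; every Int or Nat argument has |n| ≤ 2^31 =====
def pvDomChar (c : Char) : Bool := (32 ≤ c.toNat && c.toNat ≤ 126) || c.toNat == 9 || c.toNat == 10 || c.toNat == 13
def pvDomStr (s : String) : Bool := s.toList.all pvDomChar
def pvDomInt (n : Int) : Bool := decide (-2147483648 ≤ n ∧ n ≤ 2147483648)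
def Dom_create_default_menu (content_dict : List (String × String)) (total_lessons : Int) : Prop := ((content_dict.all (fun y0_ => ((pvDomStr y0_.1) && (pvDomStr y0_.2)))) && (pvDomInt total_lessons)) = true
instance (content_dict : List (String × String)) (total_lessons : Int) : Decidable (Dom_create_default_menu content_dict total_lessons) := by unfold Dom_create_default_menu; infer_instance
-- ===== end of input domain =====

-- B replaces A's per-lesson scan over all keys by one pass over the keys that drops each key
-- into its lesson slot via a precomputed "Lesson i:"-prefix dictionary (first match wins).

-- shared f-string helpers: f"Lesson {i}:" and f"Lesson {i}: (Sắp ra mắt)"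
def pvLabel (i : Int) : String := "Lesson " ++ PySem.Int.toStr i ++ ":"
def pvDefault (i : Int) : String := "Lesson " ++ PySem.Int.toStr i ++ ": (Sắp ra mắt)"

-- ===== PORT A =====
def create_default_menu (content_dict : List (String × String)) (total_lessons : Int) : List String :=
  (PySem.List.pyRange 1 (total_lessons + 1) 1).foldl
    (fun menu i =>
      match (content_dict.map Prod.fst).find? (fun k => PySem.Str.startswith k (pvLabel i)) with
      | some k => if k ≠ "" then menu ++ [k] else menu ++ [pvDefault i]
      | none => menu ++ [pvDefault i])
    []

-- ===== PORT B =====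
-- B-side helpers: the prefix → lesson-number dictionary, and the body of B's single pass
def pvSlots (total_lessons : Int) : PySem.Dict String Int :=
  (PySem.List.pyRange 1 (total_lessons + 1) 1).foldl
    (fun d i => d.insert (pvLabel i) i) PySem.Dict.empty

def pvStep (slots : PySem.Dict String Int) (menu : List (Option String)) (k : String) :
    List (Option String) :=
  let pos := PySem.Str.find k ":"
  if pos ≠ -1 then
    match slots.get? (PySem.Str.slice k none (some (pos + 1))) with
    | some i =>
        if PySem.List.pyGetD menu (i - 1) none = none
        then PySem.List.pySetD menu (i - 1) (some k) else menu
    | none => menu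
  else menu

def create_default_menu_alt (content_dict : List (String × String)) (total_lessons : Int) : List String :=
  let slots := pvSlots total_lessons
  let menu0 : List (Option String) := List.replicate (max total_lessons 0).toNat none
  let menu := (content_dict.map Prod.fst).foldl (pvStep slots) menu0
  (PySem.List.enumerate menu 1).map (fun p =>
    match p.2 with
    | some k => k
    | none => pvDefault p.1)

-- ===== PRECONDITION & SPEC =====
def Spec_create_default_menu (content_dict : List (String × String)) (total_lessons : Int) (out : List String) : Prop := out = create_default_menu_alt content_dict total_lessons
instance (content_dict : List (String × String)) (total_lessons : Int) (out : List String) : Decidable (Spec_create_default_menu content_dict total_lessons out) := by unfold Spec_create_default_menu; infer_instance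

-- ===== CLAIM (what is proved, stated in full; the proofs are below) =====
def Claim_equal_create_default_menu : Prop := ∀ (content_dict : List (String × String)) (total_lessons : Int), Dom_create_default_menu content_dict total_lessons → Spec_create_default_menu content_dict total_lessons (create_default_menu content_dict total_lessons)

-- ===== LEMMAS AND PROOFS =====

theorem pv_toDigitsCore_eq (n : ℕ) : ∀ (f : ℕ), n < f → ∀ acc,
    Nat.toDigitsCore 10 f n acc =
      (if n = 0 then ['0'] else ((Nat.digits 10 n).map Nat.digitChar).reverse) ++ acc := by
  induction n using Nat.strong_induction_on with
  | _ n ih =>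
    intro f hf acc
    match f with
    | f + 1 =>
      rw [Nat.toDigitsCore]
      by_cases h0 : n = 0
      · subst h0; simp [Nat.digitChar]
      · have hd : Nat.digits 10 n = n % 10 :: Nat.digits 10 (n / 10) := by
          rw [Nat.digits_def' (by norm_num) (Nat.pos_of_ne_zero h0)]
        by_cases hq : n / 10 = 0
        · simp only [hq, if_pos rfl, if_neg h0, hd, Nat.digits_zero, List.map_cons,
            List.map_nil, List.reverse_cons, List.reverse_nil]
          simp
        · rw [if_neg hq, ih (n / 10) (Nat.div_lt_self (Nat.pos_of_ne_zero h0) (by norm_num))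
            f (by omega) _, if_neg hq, hd]
          rw [if_neg h0]
          simp

theorem pv_toChars_pos (i : Int) (h : 1 ≤ i) :
    PySem.Int.toChars i = ((Nat.digits 10 i.toNat).map Nat.digitChar).reverse := by
  have h0 : ¬ i < 0 := by omega
  have ht : i.toNat ≠ 0 := by omega
  rw [PySem.Int.toChars, if_neg h0, Nat.toDigits,
    pv_toDigitsCore_eq _ _ (Nat.lt_succ_self _) [], if_neg ht, List.append_nil]

theorem pv_digitChar_lt10 (d : ℕ) (hd : d < 10) : (Nat.digitChar d).isDigit = true := by
  interval_cases d <;> decide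

theorem pv_toChars_no_colon (i : Int) (h : 1 ≤ i) : ∀ c ∈ PySem.Int.toChars i, c ≠ ':' := by
  intro c hc
  rw [pv_toChars_pos i h, List.mem_reverse, List.mem_map] at hc
  obtain ⟨d, hd, rfl⟩ := hc
  have : d < 10 := Nat.digits_lt_base (by norm_num) hd
  have := pv_digitChar_lt10 d this
  intro he; rw [he] at this; exact absurd this (by decide)

theorem pv_map_digitChar_inj : ∀ (a b : List ℕ), (∀ x ∈ a, x < 10) → (∀ x ∈ b, x < 10) →
    a.map Nat.digitChar = b.map Nat.digitChar → a = b := by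
  intro a
  induction a with
  | nil => intro b _ _ h; cases b <;> simp_all
  | cons x xs ih =>
    intro b ha hb h
    cases b with
    | nil => simp at h
    | cons y ys =>
      simp only [List.map_cons, List.cons.injEq] at h
      have hx : x < 10 := ha x (by simp)
      have hy : y < 10 := hb y (by simp)
      have hdc : ∀ x < 10, ∀ y < 10, Nat.digitChar x = Nat.digitChar y → x = y := by decide
      have hxy : x = y := hdc x hx y hy h.1
      rw [hxy, ih ys (fun z hz => ha z (by simp [hz])) (fun z hz => hb z (by simp [hz])) h.2]

theorem pv_toChars_inj (i j : Int) (hi : 1 ≤ i) (hj : 1 ≤ j)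
    (h : PySem.Int.toChars i = PySem.Int.toChars j) : i = j := by
  rw [pv_toChars_pos i hi, pv_toChars_pos j hj] at h
  have h2 := List.reverse_injective h
  have h3 := pv_map_digitChar_inj _ _
    (fun x hx => Nat.digits_lt_base (by norm_num) hx)
    (fun x hx => Nat.digits_lt_base (by norm_num) hx) h2
  have h4 : i.toNat = j.toNat := by
    have := congrArg (Nat.ofDigits 10) h3
    rwa [Nat.ofDigits_digits, Nat.ofDigits_digits] at this
  omega

theorem toList_pvLabel' (i : Int) :
    ("Lesson " ++ PySem.Int.toStr i ++ ":").toList = "Lesson ".toList ++ PySem.Int.toChars i ++ [':'] := by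
  simp [PySem.Int.toList_toStr]

theorem pvLabel_inj' (i j : Int) (hi : 1 ≤ i) (hj : 1 ≤ j)
    (h : ("Lesson " ++ PySem.Int.toStr i ++ ":") = ("Lesson " ++ PySem.Int.toStr j ++ ":")) : i = j := by
  have h2 := congrArg String.toList h
  rw [toList_pvLabel', toList_pvLabel'] at h2
  rw [List.append_assoc, List.append_assoc] at h2
  have h3 := List.append_cancel_left h2
  have h4 := List.append_cancel_right h3
  exact pv_toChars_inj i j hi hj h4

theorem pv_sw_ne_empty (k : String) (i : Int)
    (hs : PySem.Str.startswith k ("Lesson " ++ PySem.Int.toStr i ++ ":") = true) : k ≠ "" := by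
  rw [PySem.Str.startswith_eq, PySem.Chars.startswith_iff, toList_pvLabel'] at hs
  intro he
  subst he
  simp at hs

theorem pv_single_prefix (c : Char) (l : List Char) : [c] <+: l ↔ l.head? = some c := by
  cases l <;> simp [List.cons_prefix_cons, eq_comm]

set_option maxRecDepth 4096 in
theorem pv_pre_no_colon (i : Int) (hi : 1 ≤ i) :
    ∀ c ∈ "Lesson ".toList ++ PySem.Int.toChars i, c ≠ ':' := by
  intro c hc
  rcases List.mem_append.mp hc with h | h
  · have hL : "Lesson ".toList = ['L','e','s','s','o','n',' '] := by decide
    rw [hL] at h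
    fin_cases h <;> decide
  · exact pv_toChars_no_colon i hi c h

theorem pv_find_colon' (k : String) (i : Int) (hi : 1 ≤ i)
    (hs : PySem.Str.startswith k ("Lesson " ++ PySem.Int.toStr i ++ ":") = true) :
    PySem.Str.find k ":" = (("Lesson ".toList ++ PySem.Int.toChars i).length : Int) ∧
    PySem.Str.slice k none (some (PySem.Str.find k ":" + 1)) = ("Lesson " ++ PySem.Int.toStr i ++ ":") := by
  set pre := "Lesson ".toList ++ PySem.Int.toChars i with hpre
  rw [PySem.Str.startswith_eq, PySem.Chars.startswith_iff, toList_pvLabel'] at hs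
  obtain ⟨rest, hrest⟩ := hs
  have hk1 : k.toList = pre ++ ([':'] ++ rest) := by rw [← hrest]; simp [hpre]
  have hk2 : k.toList = (pre ++ [':']) ++ rest := by rw [hk1]; simp
  have hmlt : ∀ idx < pre.length, ¬ ([':'] <+: k.toList.drop idx) := by
    intro idx hidx hpx
    rw [pv_single_prefix, List.head?_drop, hk1,
      List.getElem?_append_left hidx, List.getElem?_eq_getElem hidx] at hpx
    exact pv_pre_no_colon i hi _ (List.getElem_mem hidx) (Option.some_inj.mp hpx)
  have hat : [':'] <+: k.toList.drop pre.length := by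
    rw [hk1, List.drop_left]
    exact ⟨rest, rfl⟩
  have hfe : PySem.Str.find k ":" = PySem.Chars.find k.toList [':'] := PySem.Str.find_eq k ":"
  have hnn : 0 ≤ PySem.Chars.find k.toList [':'] := by
    rw [PySem.Chars.find_nonneg_iff]
    exact ⟨pre, rest, by rw [List.append_assoc]; exact hk1.symm⟩
  obtain ⟨hsp, hmin⟩ := PySem.Chars.find_spec hnn
  have hm : (PySem.Chars.find k.toList [':']).toNat = pre.length := by
    rcases Nat.lt_trichotomy (PySem.Chars.find k.toList [':']).toNat pre.length with h | h | h
    · exact absurd hsp (hmlt _ h)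
    · exact h
    · exact absurd hat (hmin _ h)
  have hfind : PySem.Str.find k ":" = (pre.length : Int) := by rw [hfe]; omega
  refine ⟨hfind, ?_⟩
  rw [← String.toList_inj, PySem.Str.toList_slice, PySem.Chars.slice_eq_listSlice, hfind,
    toList_pvLabel', ← hpre]
  have : (pre.length : Int) + 1 = ((pre.length + 1 : ℕ) : Int) := by push_cast; ring
  rw [this, PySem.List.slice_to_natCast, hk2]
  have hlen : pre.length + 1 = (pre ++ [':']).length := by simp
  rw [hlen, List.take_left]


theorem pvSlots_items (total : Int) :
    (pvSlots total).items =
      (PySem.List.pyRange 1 (total + 1) 1).map (fun i => (pvLabel i, i)) := by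
  have hnd : ((PySem.List.pyRange 1 (total + 1) 1).map pvLabel).Nodup := by
    refine (PySem.List.nodup_pyRange_one 1 (total+1)).map_on ?_
    intro x hx y hy hxy
    rw [PySem.List.mem_pyRange_one] at hx hy
    exact (pvLabel_inj' x y hx.1 hy.1 hxy).symm ▸ rfl
  have := PySem.Dict.items_foldl_insert_fresh (PySem.List.pyRange 1 (total + 1) 1)
    pvLabel id PySem.Dict.empty (fun a _ => by simp) hnd
  simpa [pvSlots] using this
theorem pvSlots_get (total i : Int) (c : String) :
    (pvSlots total).get? c = some i ↔ 1 ≤ i ∧ i ≤ total ∧ c = pvLabel i := by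
  have hnd : ((PySem.List.pyRange 1 (total + 1) 1).map pvLabel).Nodup := by
    refine (PySem.List.nodup_pyRange_one 1 (total+1)).map_on ?_
    intro x hx y hy hxy
    rw [PySem.List.mem_pyRange_one] at hx hy
    exact (pvLabel_inj' x y hx.1 hy.1 hxy).symm ▸ rfl
  have hkeys : (pvSlots total).keys.Nodup := by
    have : (pvSlots total).keys =
        (PySem.List.pyRange 1 (total + 1) 1).map pvLabel := by
      simp [PySem.Dict.keys, pvSlots_items, Function.comp_def]
    rw [this]; exact hnd
  rw [PySem.Dict.get?_eq_some_iff_mem_items _ _ _ hkeys, pvSlots_items, List.mem_map]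
  constructor
  · rintro ⟨x, hx, hxe⟩
    rw [PySem.List.mem_pyRange_one] at hx
    obtain ⟨h1, h2⟩ := Prod.mk.injEq .. ▸ hxe
    subst h2
    exact ⟨hx.1, by omega, h1.symm⟩
  · rintro ⟨h1, h2, rfl⟩
    exact ⟨i, PySem.List.mem_pyRange_one.mpr ⟨h1, by omega⟩, rfl⟩

theorem pv_trigger_iff (total i : Int) (k : String) :
    (PySem.Str.find k ":" ≠ -1 ∧
      (pvSlots total).get? (PySem.Str.slice k none (some (PySem.Str.find k ":" + 1))) = some i) ↔
    (1 ≤ i ∧ i ≤ total ∧ PySem.Str.startswith k (pvLabel i) = true) := by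
  constructor
  · rintro ⟨hpos, hget⟩
    obtain ⟨h1, h2, hc⟩ := (pvSlots_get total i _).mp hget
    refine ⟨h1, h2, ?_⟩
    rw [PySem.Str.startswith_eq, PySem.Chars.startswith_iff]
    have hnn : 0 ≤ PySem.Str.find k ":" := by
      have hge : -1 ≤ PySem.Str.find k ":" := by
        rw [PySem.Str.find_eq]; exact PySem.Chars.neg_one_le_find _ _
      omega
    have : (pvLabel i).toList = (PySem.Str.slice k none (some (PySem.Str.find k ":" + 1))).toList := by
      rw [hc]
    rw [this, PySem.Str.toList_slice, PySem.Chars.slice_eq_listSlice]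
    have hst := PySem.List.slice_to (xs := k.toList) (b := PySem.Str.find k ":" + 1) (by omega)
    rw [hst]
    exact List.take_prefix _ _
  · rintro ⟨h1, h2, hs⟩
    obtain ⟨hfind, hslice⟩ := pv_find_colon' k i h1 hs
    constructor
    · rw [hfind]; omega
    · rw [hslice]
      exact (pvSlots_get total i _).mpr ⟨h1, h2, rfl⟩

theorem pvStep_length (slots : PySem.Dict String Int) (menu : List (Option String)) (k : String) :
    (pvStep slots menu k).length = menu.length := by
  simp only [pvStep]
  split
  · split
    · split
      · exact PySem.List.length_pySetD _ _ _
      · rfl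
    · rfl
  · rfl

theorem pv_foldB_length (total : Int) (keys : List String) :
    ∀ (menu : List (Option String)),
      (keys.foldl (pvStep (pvSlots total)) menu).length = menu.length := by
  induction keys with
  | nil => intro menu; rfl
  | cons k ks ih => intro menu; rw [List.foldl_cons, ih, pvStep_length]

theorem pv_foldB_elem (total : Int) (keys : List String) :
    ∀ (menu : List (Option String)) (j : ℕ) (hj : j < menu.length),
      (keys.foldl (pvStep (pvSlots total)) menu)[j]? =
        some ((menu[j]).or
          (keys.find? (fun k =>
            decide (1 ≤ ((j : Int) + 1)) && decide (((j : Int) + 1) ≤ total) &&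
              PySem.Str.startswith k (pvLabel ((j : Int) + 1))))) := by
  induction keys with
  | nil =>
    intro menu j hj
    simp [List.getElem?_eq_getElem hj]
  | cons k ks ih =>
    intro menu j hj
    rw [List.foldl_cons, List.find?_cons]
    have hj' : j < (pvStep (pvSlots total) menu k).length := by rw [pvStep_length]; exact hj
    rw [ih _ j hj']
    by_cases htrig : PySem.Str.find k ":" ≠ -1 ∧
        ∃ i, (pvSlots total).get? (PySem.Str.slice k none (some (PySem.Str.find k ":" + 1))) = some i
    · obtain ⟨hpos, i, hget⟩ := htrig
      obtain ⟨h1, h2, hsw⟩ := (pv_trigger_iff total i k).mp ⟨hpos, hget⟩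
      have hstep : pvStep (pvSlots total) menu k =
          if PySem.List.pyGetD menu (i - 1) none = none
          then PySem.List.pySetD menu (i - 1) (some k) else menu := by
        simp only [pvStep, if_pos hpos, hget]
      by_cases hij : i = (j : Int) + 1
      · -- k lands (or would land) exactly in slot j
        have hpred : (decide (1 ≤ ((j : Int) + 1)) && decide (((j : Int) + 1) ≤ total) &&
            PySem.Str.startswith k (pvLabel ((j : Int) + 1))) = true := by
          rw [← hij, decide_eq_true h1, decide_eq_true h2, hsw]
          rfl
        have him1 : i - 1 = ((j : ℕ) : Int) := by omega
        simp only [hpred, hstep, him1, PySem.List.pyGetD_natCast, PySem.List.pySetD_natCast]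
        by_cases hmj : menu[j] = none
        · have hgd : menu.getD j none = none := by
            rw [List.getD_eq_getElem?_getD, List.getElem?_eq_getElem hj, hmj]; rfl
          simp only [if_pos hgd]
          have hset : (menu.set j (some k))[j]'(by simpa using hj) = some k :=
            List.getElem_set_self (by simpa using hj)
          simp [hset, hmj]
        · have hgd : ¬ (menu.getD j none = none) := by
            rw [List.getD_eq_getElem?_getD, List.getElem?_eq_getElem hj]; simpa using hmj
          simp only [if_neg hgd]
          cases hmv : menu[j] with
          | none => exact absurd hmv hmj
          | some v => simp
      · -- k belongs to a different slot: slot j unchanged, predicate false at k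
        have hpred : (decide (1 ≤ ((j : Int) + 1)) && decide (((j : Int) + 1) ≤ total) &&
            PySem.Str.startswith k (pvLabel ((j : Int) + 1))) = false := by
          by_contra hne
          have hok : (1 ≤ (j:Int) + 1 ∧ (j:Int) + 1 ≤ total ∧
              PySem.Str.startswith k (pvLabel ((j:Int) + 1)) = true) := by
            simp only [Bool.not_eq_false, Bool.and_eq_true, decide_eq_true_eq] at hne
            exact ⟨hne.1.1, hne.1.2, hne.2⟩
          have hh := (pv_trigger_iff total ((j:Int) + 1) k).mpr hok
          rw [hget] at hh
          exact hij (Option.some_inj.mp hh.2)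
        have hmenu : (pvStep (pvSlots total) menu k)[j]'hj' = menu[j] := by
          simp only [hstep]
          split
          · have hset : PySem.List.pySetD menu (i - 1) (some k) = menu.set (i - 1).toNat (some k) :=
              PySem.List.pySetD_of_nonneg _ _ (by omega)
            simp only [hset]
            have hne : (i - 1).toNat ≠ j := by omega
            exact List.getElem_set_ne hne _
          · rfl
        simp only [hmenu, hpred]
    · -- k triggers nothing: menu unchanged, predicate false
      have hstep : pvStep (pvSlots total) menu k = menu := by
        simp only [pvStep]
        push Not at htrig
        by_cases hpos : PySem.Str.find k ":" ≠ -1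
        · have hnone := htrig hpos
          cases hgt : (pvSlots total).get? (PySem.Str.slice k none (some (PySem.Str.find k ":" + 1))) with
          | none => simp only [if_pos hpos, hgt]
          | some i => exact absurd hgt (hnone i)
        · simp only [if_neg hpos]
      have hpred : (decide (1 ≤ ((j : Int) + 1)) && decide (((j : Int) + 1) ≤ total) &&
          PySem.Str.startswith k (pvLabel ((j : Int) + 1))) = false := by
        by_contra hne
        simp only [Bool.not_eq_false, Bool.and_eq_true, decide_eq_true_eq] at hne
        have hh := (pv_trigger_iff total ((j:Int) + 1) k).mpr ⟨hne.1.1, hne.1.2, hne.2⟩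
        exact htrig ⟨hh.1, _, hh.2⟩
      simp only [hstep, hpred]

theorem pv_A_eq_map (content_dict : List (String × String)) (total : Int) :
    create_default_menu content_dict total =
      (PySem.List.pyRange 1 (total + 1) 1).map (fun i =>
        match (content_dict.map Prod.fst).find? (fun k => PySem.Str.startswith k (pvLabel i)) with
        | some k => if k ≠ "" then k else pvDefault i
        | none => pvDefault i) := by
  unfold create_default_menu
  have hbody : (fun (menu : List String) (i : Int) =>
      match (content_dict.map Prod.fst).find? (fun k => PySem.Str.startswith k (pvLabel i)) with
      | some k => if k ≠ "" then menu ++ [k] else menu ++ [pvDefault i]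
      | none => menu ++ [pvDefault i]) =
      (fun (menu : List String) (i : Int) => menu ++
        [match (content_dict.map Prod.fst).find? (fun k => PySem.Str.startswith k (pvLabel i)) with
         | some k => if k ≠ "" then k else pvDefault i
         | none => pvDefault i]) := by
    funext menu i
    cases (content_dict.map Prod.fst).find? (fun k => PySem.Str.startswith k (pvLabel i)) with
    | none => rfl
    | some k =>
      by_cases hk : k ≠ "" <;> simp [hk]
  rw [hbody, PySem.List.foldl_append_singleton_eq_map]
  simp

theorem create_default_menu_ok (content_dict : List (String × String)) (total : Int) :
    create_default_menu content_dict total = create_default_menu_alt content_dict total := by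
  rw [pv_A_eq_map]
  unfold create_default_menu_alt
  set keys := content_dict.map Prod.fst with hkeys
  set menu0 : List (Option String) := List.replicate (max total 0).toNat none with hm0
  set menuF := keys.foldl (pvStep (pvSlots total)) menu0 with hmF
  have hlen0 : menu0.length = total.toNat := by simp [hm0]; omega
  have hlenF : menuF.length = total.toNat := by rw [hmF, pv_foldB_length, hlen0]
  apply List.ext_getElem
  · rw [List.length_map, List.length_map, PySem.List.length_pyRange_one,
      PySem.List.length_enumerate, hlenF]
    omega
  · intro j hj1 hj2
    have hjt : j < total.toNat := by
      simpa [PySem.List.length_pyRange_one] using hj1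
    have hjm : j < menuF.length := by omega
    rw [List.getElem_map, List.getElem_map, PySem.List.getElem_pyRange_one,
      PySem.List.getElem_enumerate]
    have hslot : menuF[j] = keys.find? (fun k =>
        decide (1 ≤ ((j : Int) + 1)) && decide (((j : Int) + 1) ≤ total) &&
          PySem.Str.startswith k (pvLabel ((j : Int) + 1))) := by
      have hjm0 : j < menu0.length := by omega
      have := pv_foldB_elem total keys menu0 j hjm0
      rw [← hmF] at this
      rw [List.getElem?_eq_getElem hjm] at this
      have h0 : menu0[j] = none := by simp [hm0]
      rw [h0] at this
      simpa using this
    have hpe : (fun k => decide (1 ≤ ((j : Int) + 1)) && decide (((j : Int) + 1) ≤ total) &&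
          PySem.Str.startswith k (pvLabel ((j : Int) + 1))) =
        (fun k => PySem.Str.startswith k (pvLabel (1 + (j : Int)))) := by
      funext k
      have e1 : (1 : Int) ≤ (j : Int) + 1 := by omega
      have e2 : ((j : Int) + 1) ≤ total := by omega
      have e3 : (j : Int) + 1 = 1 + (j : Int) := by ring
      rw [decide_eq_true e1, decide_eq_true e2, e3]
      simp
    rw [hslot, hpe]
    cases hf : keys.find? (fun k => PySem.Str.startswith k (pvLabel (1 + (j : Int)))) with
    | none => simp
    | some k =>
      have hsw := List.find?_some hf
      have hne : k ≠ "" := pv_sw_ne_empty k _ hsw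
      simp [hne]

-- ===== VERDICT (by name: the statement is the Claim_ definition above) =====
theorem create_default_menu_spec : Claim_equal_create_default_menu := by
  intro content_dict total_lessons _
  unfold Spec_create_default_menu
  exact create_default_menu_ok content_dict total_lessons
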